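-- pv_equiv track=rewrite | github.com/ckelleher-wustl/CodeStoriesViz | historyQuery.py | splitByFilename
-- ===== SOURCE A (Python) =====
-- def splitByFilename(code_entries):
--     entriesByFilename = {}
--     for codeEvent in code_entries:
--         filename = codeEvent["notes"]
--         filename = filename[6:]
--         if (";" in filename):
--             filename = filename[0:filename.index(';')]
--
--         if (filename not in entriesByFilename):
--             entriesByFilename[filename] = [codeEvent]
--         else:
--             entriesByFilename[filename].append(codeEvent)
--
--     return entriesByFilename
-- ===== SOURCE B (Python) =====
-- def splitByFilename(code_entries):
--     # Compute each entry's filename key once, then group by comprehension.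
--     keys = [e["notes"][6:].split(';')[0] for e in code_entries]
--     order = list(dict.fromkeys(keys))
--     return {k: [e for e, kk in zip(code_entries, keys) if kk == k] for k in order}
-- ===== Notes on version B (the rewrite author's own statement) =====
-- stated objective: alternative
-- what changed: Replaces the incremental dict-building loop (membership test, then insert-or-append per entry) by computing every entry's key once, deduping the key list in first-occurrence order with dict.fromkeys, and building each group in one comprehension over the precomputed (entry, key) pairs.
import Mathlib
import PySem

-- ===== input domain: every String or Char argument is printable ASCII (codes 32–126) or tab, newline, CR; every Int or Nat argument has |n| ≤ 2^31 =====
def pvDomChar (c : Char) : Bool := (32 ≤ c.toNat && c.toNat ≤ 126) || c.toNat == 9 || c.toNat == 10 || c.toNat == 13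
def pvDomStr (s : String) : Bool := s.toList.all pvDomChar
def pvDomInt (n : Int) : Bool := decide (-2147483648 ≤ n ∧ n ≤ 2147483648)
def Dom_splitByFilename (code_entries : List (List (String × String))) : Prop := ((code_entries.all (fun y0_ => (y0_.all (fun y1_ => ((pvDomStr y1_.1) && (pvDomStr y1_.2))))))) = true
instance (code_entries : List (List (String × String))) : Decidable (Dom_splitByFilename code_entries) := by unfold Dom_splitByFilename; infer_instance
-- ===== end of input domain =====

-- B groups by precomputing each entry's key, deduping keys in first-occurrence order, and
-- filtering the entries per key, instead of A's incremental dict-building loop (return value only; no mutation involved).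

-- ===== PORT A =====
-- codeEvent["notes"] raises KeyError when the key is missing; Pre_ excludes that, so .getD "" is never reached there.
def splitByFilename (code_entries : List (List (String × String))) : List (String × List (List (String × String))) :=
  (code_entries.foldl (fun entriesByFilename codeEvent =>
      let filename0 := ((PySem.Dict.mk codeEvent).get? "notes").getD ""
      let filename1 := PySem.Str.slice filename0 (some 6) none
      let filename :=
        if PySem.Str.isIn ";" filename1 then
          -- guarded by the 'in' test, filename.index(';') is s.find(';')
          PySem.Str.slice filename1 (some 0) (some (PySem.Str.find filename1 ";"))
        else filename1
      if entriesByFilename.contains filename = false then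
        entriesByFilename.insert filename [codeEvent]
      else
        entriesByFilename.modify filename [] (fun l => l ++ [codeEvent])
    ) PySem.Dict.empty).items

-- ===== PORT B =====
-- e["notes"][6:].split(';')[0]  (split(';') is never empty, so [0] is its head)
def pvKeyB (e : List (String × String)) : String :=
  (((PySem.Str.split? (PySem.Str.slice (((PySem.Dict.mk e).get? "notes").getD "") (some 6) none) ";").getD []).headD "")

def splitByFilename_alt (code_entries : List (List (String × String))) : List (String × List (List (String × String))) :=
  let keys := code_entries.map pvKeyB
  let order := PySem.List.dedup keys
  order.map (fun k => (k, ((code_entries.zip keys).filter (fun p => p.2 == k)).map (fun p => p.1)))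

-- ===== PRECONDITION & SPEC =====
-- Pre_ excludes exactly the entries without a "notes" key, on which A raises KeyError.
def Pre_splitByFilename (code_entries : List (List (String × String))) : Prop :=
  ∀ e ∈ code_entries, (PySem.Dict.mk e).contains "notes" = true
instance (code_entries : List (List (String × String))) : Decidable (Pre_splitByFilename code_entries) := by unfold Pre_splitByFilename; infer_instance
def pvWitness_splitByFilename : (List (List (String × String))) :=
  [[("notes", "file: x.py;cell 1")], [("notes", "file: y.py")], [("notes", "file: x.py")]]

def Spec_splitByFilename (code_entries : List (List (String × String))) (out : List (String × List (List (String × String)))) : Prop := out = splitByFilename_alt code_entries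
instance (code_entries : List (List (String × String))) (out : List (String × List (List (String × String)))) : Decidable (Spec_splitByFilename code_entries out) := by unfold Spec_splitByFilename; infer_instance

-- ===== CLAIM (what is proved, stated in full; the proofs are below) =====
def Claim_equal_splitByFilename : Prop := ∀ (code_entries : List (List (String × String))), Dom_splitByFilename code_entries → Pre_splitByFilename code_entries → Spec_splitByFilename code_entries (splitByFilename code_entries)

-- ===== LEMMAS AND PROOFS =====

-- the common key function both proofs reduce to
def pvKey (e : List (String × String)) : String :=
  String.ofList ((PySem.Str.slice (((PySem.Dict.mk e).get? "notes").getD "") (some 6) none).toList.takeWhile (fun x => x != ';'))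

-- find.go on a single-character needle counts up to the first occurrence
lemma pv_find_go_single (c : Char) : ∀ (s : List Char) (k : Nat),
    PySem.Chars.find.go [c] s k =
      if c ∈ s then (k : Int) + ((s.takeWhile (fun x => x != c)).length : Int) else -1 := by
  intro s
  induction s with
  | nil => intro k; simp [PySem.Chars.find.go]
  | cons x t ih =>
    intro k
    by_cases hx : x = c
    · subst hx
      simp [PySem.Chars.find.go, List.isPrefixOf, List.takeWhile]
    · have hpre : List.isPrefixOf [c] (x :: t) = false := by
        simp [List.isPrefixOf]; exact fun h => absurd h.symm hx
      simp only [PySem.Chars.find.go, hpre, Bool.false_eq_true, if_false]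
      rw [ih (k + 1)]
      have hne : ¬ c = x := fun h => hx h.symm
      have hb : (x != c) = true := by simp [hx]
      by_cases hm : c ∈ t
      · have hmem : c ∈ x :: t := List.mem_cons_of_mem _ hm
        simp only [hm, hmem, if_true, List.takeWhile_cons, hb, List.length_cons]
        push_cast; omega
      · have hmem : c ∉ x :: t := by simp [List.mem_cons, hne, hm]
        simp [hm, hmem]

lemma pv_take_takeWhile_length {α : Type} (p : α → Bool) (s : List α) :
    s.take ((s.takeWhile p).length) = s.takeWhile p := by
  induction s with
  | nil => simp
  | cons x t ih =>
    by_cases h : p x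
    · simp [List.takeWhile, h, ih]
    · simp [List.takeWhile, h]

-- A's "cut at first ';' if present" is takeWhile (· ≠ ';'), on the char-list side
lemma pv_keyA_chars (c : Char) (s : List Char) :
    (if PySem.Chars.isIn [c] s then PySem.List.slice s (some 0) (some (PySem.Chars.find s [c])) else s)
      = s.takeWhile (fun x => x != c) := by
  have hfind : PySem.Chars.find s [c] =
      if c ∈ s then ((s.takeWhile (fun x => x != c)).length : Int) else -1 := by
    unfold PySem.Chars.find
    rw [pv_find_go_single c s 0]
    by_cases h : c ∈ s <;> simp [h]
  by_cases h : c ∈ s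
  · have hIn : PySem.Chars.isIn [c] s = true := by
      unfold PySem.Chars.isIn
      rw [hfind]; simp [h]
    rw [hIn, if_pos rfl, hfind, if_pos h]
    rw [PySem.List.slice_zero_start, PySem.List.slice_to_natCast]
    exact pv_take_takeWhile_length _ s
  · have hIn : PySem.Chars.isIn [c] s = false := by
      unfold PySem.Chars.isIn
      rw [hfind]; simp [h]
    rw [hIn]
    simp only [Bool.false_eq_true, if_false]
    symm
    rw [List.takeWhile_eq_self_iff]
    intro x hx
    simp only [bne_iff_ne, ne_eq]
    exact fun hxc => h (hxc ▸ hx)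

-- splitOn.go returns the reversed accumulator in front of some tail
lemma pv_go_acc (c : Char) : ∀ (fuel : Nat) (s cur : List Char) (acc : List (List Char)),
    ∃ t, PySem.Chars.splitOn.go [c] fuel s cur acc = acc.reverse ++ t := by
  intro fuel
  induction fuel with
  | zero =>
    intro s cur acc
    exact ⟨[cur.reverse ++ s], by simp [PySem.Chars.splitOn.go]⟩
  | succ f ih =>
    intro s cur acc
    match s with
    | [] => exact ⟨[cur.reverse], by simp [PySem.Chars.splitOn.go]⟩
    | x :: rest =>
      by_cases hx : x = c
      · subst hx
        obtain ⟨t, ht⟩ := ih rest [] (cur.reverse :: acc)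
        refine ⟨cur.reverse :: t, ?_⟩
        simp only [PySem.Chars.splitOn.go, List.isPrefixOf, beq_self_eq_true, Bool.and_self, if_true,
          List.length_cons, List.length_nil, List.drop_succ_cons, List.drop_zero]
        rw [ht]; simp
      · obtain ⟨t, ht⟩ := ih rest (x :: cur) acc
        refine ⟨t, ?_⟩
        have hp : List.isPrefixOf [c] (x :: rest) = false := by
          simp [List.isPrefixOf]; exact fun h => absurd h.symm hx
        simp only [PySem.Chars.splitOn.go, hp, Bool.false_eq_true, if_false]
        exact ht

-- head of splitOn.go on a single-character separator, with fuel to spare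
lemma pv_go_headD (c : Char) : ∀ (fuel : Nat) (s cur : List Char), s.length < fuel →
    (PySem.Chars.splitOn.go [c] fuel s cur []).headD [] = cur.reverse ++ s.takeWhile (fun x => x != c) := by
  intro fuel
  induction fuel with
  | zero => intro s cur h; omega
  | succ f ih =>
    intro s cur h
    match s with
    | [] => simp [PySem.Chars.splitOn.go]
    | x :: rest =>
      by_cases hx : x = c
      · subst hx
        obtain ⟨t, ht⟩ := pv_go_acc x f rest [] [cur.reverse]
        simp only [PySem.Chars.splitOn.go, List.isPrefixOf, beq_self_eq_true, Bool.and_self, if_true,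
          List.length_cons, List.length_nil, List.drop_succ_cons, List.drop_zero]
        rw [ht]
        simp
      · have hp : List.isPrefixOf [c] (x :: rest) = false := by
          simp [List.isPrefixOf]; exact fun h => absurd h.symm hx
        simp only [PySem.Chars.splitOn.go, hp, Bool.false_eq_true, if_false]
        have hlt : rest.length < f := by simpa using h
        rw [ih rest (x :: cur) hlt]
        have hb : (x != c) = true := by simp [hx]
        simp [hb]

lemma pv_splitOn_headD (c : Char) (s : List Char) :
    (PySem.Chars.splitOn s [c]).headD [] = s.takeWhile (fun x => x != c) := by
  unfold PySem.Chars.splitOn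
  rw [pv_go_headD c (s.length + 1) s [] (by omega)]
  simp

-- both ports compute pvKey
lemma pv_keyB_eq (e : List (String × String)) : pvKeyB e = pvKey e := by
  unfold pvKeyB pvKey
  set s := PySem.Str.slice (((PySem.Dict.mk e).get? "notes").getD "") (some 6) none with hs
  have h1 : (";" : String).toList = [';'] := rfl
  have hsplit : PySem.Str.split? s ";" = some ((PySem.Chars.splitOn s.toList [';']).map String.ofList) := by
    simp [PySem.Str.split?, PySem.Chars.split?, h1]
  rw [hsplit]
  simp only [Option.getD_some]
  have hhead : ∀ (xs : List (List Char)), ((xs.map String.ofList).headD "") = String.ofList (xs.headD []) := by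
    intro xs; cases xs <;> rfl
  rw [hhead, pv_splitOn_headD]

lemma pv_keyA_eq (e : List (String × String)) :
    (let filename1 := PySem.Str.slice (((PySem.Dict.mk e).get? "notes").getD "") (some 6) none
     if PySem.Str.isIn ";" filename1 then
       PySem.Str.slice filename1 (some 0) (some (PySem.Str.find filename1 ";"))
     else filename1) = pvKey e := by
  unfold pvKey
  set s := PySem.Str.slice (((PySem.Dict.mk e).get? "notes").getD "") (some 6) none with hs
  show (if PySem.Str.isIn ";" s then PySem.Str.slice s (some 0) (some (PySem.Str.find s ";")) else s)
      = String.ofList (s.toList.takeWhile (fun x => x != ';'))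
  have h1 : (";" : String).toList = [';'] := rfl
  have hch := pv_keyA_chars ';' s.toList
  simp only [PySem.Str.isIn, PySem.Str.find, PySem.Str.slice, h1, PySem.Chars.slice_eq_listSlice]
  by_cases h : PySem.Chars.isIn [';'] s.toList
  · rw [if_pos h] at hch
    rw [if_pos h, hch]
  · rw [if_neg h] at hch
    rw [if_neg h, ← hch, String.ofList_toList]

-- items of a key-nodup dict are its keys paired with their values
lemma pv_items_eq_list {ν : Type} : ∀ (l : List (String × ν)) (d0 : ν), (l.map Prod.fst).Nodup →
    l = (l.map Prod.fst).map (fun k => (k, (PySem.Dict.mk l).getD k d0)) := by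
  intro l
  induction l with
  | nil => intro d0 _; rfl
  | cons x t ih =>
    intro d0 hnd
    obtain ⟨k0, v0⟩ := x
    simp only [List.map_cons, List.nodup_cons] at hnd
    simp only [List.map_cons, List.cons.injEq]
    constructor
    · simp [PySem.Dict.getD_eq_get?_getD, PySem.Dict.get?_mk_cons]
    · have htail : (List.map Prod.fst t).map (fun k => (k, (PySem.Dict.mk ((k0, v0) :: t)).getD k d0))
          = (List.map Prod.fst t).map (fun k => (k, (PySem.Dict.mk t).getD k d0)) := by
        apply List.map_congr_left
        intro k hk
        have hne : (k0 == k) = false := by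
          simp only [beq_eq_false_iff_ne, ne_eq]
          exact fun hkk => hnd.1 (hkk ▸ hk)
        simp [PySem.Dict.getD_eq_get?_getD, PySem.Dict.get?_mk_cons, hne]
      rw [htail]
      exact ih d0 hnd.2

lemma pv_items_eq {ν : Type} (d : PySem.Dict String ν) (d0 : ν) (h : d.keys.Nodup) :
    d.items = d.keys.map (fun k => (k, d.getD k d0)) := by
  obtain ⟨l⟩ := d
  exact pv_items_eq_list l d0 h

-- ===== VERDICT (by name: the statement is the Claim_ definition above) =====
theorem splitByFilename_spec : Claim_equal_splitByFilename := by
  unfold Claim_equal_splitByFilename Spec_splitByFilename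
  intro ces _ _
  unfold splitByFilename splitByFilename_alt
  -- A's loop body is one dict 'modify' on the common key
  have hstep : (fun (entriesByFilename : PySem.Dict String (List (List (String × String)))) codeEvent =>
      let filename0 := ((PySem.Dict.mk codeEvent).get? "notes").getD ""
      let filename1 := PySem.Str.slice filename0 (some 6) none
      let filename :=
        if PySem.Str.isIn ";" filename1 then
          PySem.Str.slice filename1 (some 0) (some (PySem.Str.find filename1 ";"))
        else filename1
      if entriesByFilename.contains filename = false then
        entriesByFilename.insert filename [codeEvent]
      else
        entriesByFilename.modify filename [] (fun l => l ++ [codeEvent]))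
      = (fun d e => d.modify (pvKey e) [] ((fun (_ : PySem.Dict String (List (List (String × String)))) e v => v ++ [e]) d e)) := by
    funext d e
    show (if d.contains (let filename1 := PySem.Str.slice (((PySem.Dict.mk e).get? "notes").getD "") (some 6) none
          if PySem.Str.isIn ";" filename1 then
            PySem.Str.slice filename1 (some 0) (some (PySem.Str.find filename1 ";"))
          else filename1) = false then _ else _) = _
    rw [pv_keyA_eq e]
    by_cases hc : d.contains (pvKey e)
    · simp [hc]
    · simp only [Bool.not_eq_true] at hc
      simp [hc, PySem.Dict.modify, PySem.Dict.getD_of_not_contains _ _ hc]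
  rw [hstep]
  set D := ces.foldl (fun d e => d.modify (pvKey e) []
      ((fun (_ : PySem.Dict String (List (List (String × String)))) e v => v ++ [e]) d e)) PySem.Dict.empty with hD
  have hkeys : D.keys = PySem.Set.ofList (ces.map pvKey) := by
    rw [hD, PySem.Dict.keys_foldl_modify_key ces pvKey [] _ PySem.Dict.empty]
    rw [PySem.Dict.keys_empty, PySem.Set.ofList_eq_foldl]
    rfl
  have hnodup : D.keys.Nodup := by
    rw [hD]
    exact PySem.Dict.nodup_keys_foldl_modify_key ces pvKey [] _ PySem.Dict.empty PySem.Dict.nodup_keys_empty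
  have hgetD : ∀ k, D.getD k [] = ces.filter (fun e => pvKey e == k) := by
    intro k
    have hfold : D = (ces.map (fun e => (pvKey e, e))).foldl
        (fun d p => d.modify p.1 [] (fun v => v ++ [p.2])) PySem.Dict.empty := by
      rw [hD, List.foldl_map]
    rw [hfold, PySem.Dict.getD_foldl_modify_append, PySem.Dict.getD_empty]
    rw [List.filter_map]
    simp [Function.comp_def]
  rw [pv_items_eq D [] hnodup, hkeys]
  -- B's side reduces to the same map over the deduped keys
  have hkB : ces.map pvKeyB = ces.map pvKey := List.map_congr_left (fun e _ => pv_keyB_eq e)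
  simp only [hkB, PySem.List.dedup_eq_ofList]
  apply List.map_congr_left
  intro k hk
  have hzip : ces.zip (ces.map pvKey) = ces.map (fun a => (a, pvKey a)) := by
    have := List.zip_map' (f := @id (List (String × String))) (g := pvKey) (l := ces)
    simpa using this
  rw [hzip, List.filter_map]
  simp [Function.comp_def, hgetD k]
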